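-- pv_equiv track=rewrite | github.com/NafBZ/Data-Structures | Array/findTwoHighestNumber.py | firstSecond
-- ===== SOURCE A (Python) =====
-- def firstSecond(givenList):
--     res = []
--     givenList = sorted(givenList)
--     res.append(givenList[-1])
--     for i in range(len(givenList)-1, -1, -1):
--         if givenList[i] not in res:
--             res.append(givenList[i])
--             return res
--         else:
--             continue
-- ===== SOURCE B (Python) =====
-- def firstSecond(givenList):
--     highest = max(givenList)
--     lower = [x for x in givenList if x < highest]
--     if not lower:
--         return None
--     return [highest, max(lower)]
-- ===== Notes on version B (the rewrite author's own statement) =====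
-- stated objective: simpler
-- what changed: Replaces A's sort plus reversed index scan with membership tests by a direct computation: take max(list), filter to the strictly smaller elements, and return [max, max(filtered)] or None if the filter is empty.
import Mathlib
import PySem

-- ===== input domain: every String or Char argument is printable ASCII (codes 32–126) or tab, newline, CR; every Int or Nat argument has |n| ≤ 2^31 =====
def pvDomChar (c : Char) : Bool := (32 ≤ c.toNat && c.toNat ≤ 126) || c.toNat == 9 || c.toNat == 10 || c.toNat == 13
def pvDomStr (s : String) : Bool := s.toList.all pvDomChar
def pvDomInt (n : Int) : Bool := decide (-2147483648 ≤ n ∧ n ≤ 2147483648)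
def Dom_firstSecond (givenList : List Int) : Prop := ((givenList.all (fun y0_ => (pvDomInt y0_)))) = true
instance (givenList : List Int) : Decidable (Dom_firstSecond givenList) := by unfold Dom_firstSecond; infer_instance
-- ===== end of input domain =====

-- B replaces A's sort + reversed membership scan by max() plus a filter and a second max() (one-pass builtins, no sort).

-- ===== PORT A =====
-- the 'for i in range(len(givenList)-1, -1, -1)' loop with its early 'return res'
def pvLoopA (s res : List Int) : List Int → Option (List Int)
  | [] => none
  | i :: rest =>
    match PySem.List.pyGet? s i with
    | none => none
    | some v => if res.contains v then pvLoopA s res rest else some (res ++ [v])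

def firstSecond (givenList : List Int) : Option (List Int) :=
  let s := PySem.List.sorted givenList (fun x => x) false
  match PySem.List.pyGet? s (-1) with
  | none => none   -- givenList[-1] raises IndexError on the empty list; excluded by Pre_
  | some m => pvLoopA s [m] (PySem.List.pyRange ((s.length : Int) - 1) (-1) (-1))

-- ===== PORT B =====
def firstSecond_alt (givenList : List Int) : Option (List Int) :=
  match PySem.List.max? givenList (fun y => y) with
  | none => none   -- max([]) raises ValueError; excluded by Pre_
  | some highest =>
    let lower := givenList.filter (fun x => decide (x < highest))
    match PySem.List.max? lower (fun y => y) with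
    | none => none
    | some second => some [highest, second]

-- ===== PRECONDITION & SPEC =====
-- Pre_ excludes only the empty list, on which A raises IndexError (and B raises ValueError).
def Pre_firstSecond (givenList : List Int) : Prop := givenList ≠ []
instance (givenList : List Int) : Decidable (Pre_firstSecond givenList) := by unfold Pre_firstSecond; infer_instance
def pvWitness_firstSecond : List Int := [3, 1, 2]

def Spec_firstSecond (givenList : List Int) (out : Option (List Int)) : Prop := out = firstSecond_alt givenList
instance (givenList : List Int) (out : Option (List Int)) : Decidable (Spec_firstSecond givenList out) := by unfold Spec_firstSecond; infer_instance

-- ===== CLAIM (what is proved, stated in full; the proofs are below) =====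
def Claim_equal_firstSecond : Prop := ∀ (givenList : List Int), Dom_firstSecond givenList → Pre_firstSecond givenList → Spec_firstSecond givenList (firstSecond givenList)

-- ===== LEMMAS AND PROOFS =====

-- value-level view of A's loop: scan a list of VALUES for the first one not in res
def pvFind (res : List Int) : List Int → Option (List Int)
  | [] => none
  | v :: t => if res.contains v then pvFind res t else some (res ++ [v])

-- A's loop over descending indices k-1, …, 0 is pvFind over (s.take k).reverse
lemma pvLoopA_eq_pvFind (s res : List Int) (k : Nat) (hk : k ≤ s.length) :
    pvLoopA s res (PySem.List.pyRange ((k : Int) - 1) (-1) (-1)) = pvFind res (s.take k).reverse := by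
  induction k with
  | zero =>
    rw [show ((0 : Nat) : Int) - 1 = -1 by norm_num, PySem.List.pyRange_neg_one_eq_nil (by norm_num)]
    simp [pvLoopA, pvFind]
  | succ k ih =>
    have hlt : k < s.length := hk
    rw [show (((k + 1 : Nat)) : Int) - 1 = (k : Int) by push_cast; ring,
      PySem.List.pyRange_neg_one_cons (by omega)]
    show pvLoopA s res ((k : Int) :: _) = _
    rw [List.take_add_one, List.getElem?_eq_getElem hlt]
    simp only [pvLoopA, PySem.List.pyGet?_natCast, List.getElem?_eq_getElem hlt,
      Option.toList_some, List.reverse_append, List.reverse_cons, List.reverse_nil,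
      List.nil_append, List.cons_append, pvFind]
    split
    · exact ih (le_of_lt hlt)
    · rfl

-- max? ignores the order of the list (its value is THE maximum value)
lemma max?_perm {xs ys : List Int} (h : xs.Perm ys) :
    PySem.List.max? xs (fun y => y) = PySem.List.max? ys (fun y => y) := by
  cases hx : PySem.List.max? xs (fun y => y) with
  | none =>
    rw [PySem.List.max?_eq_none_iff] at hx
    rw [eq_comm, PySem.List.max?_eq_none_iff]
    exact ((hx ▸ h).nil_eq).symm
  | some v =>
    cases hy : PySem.List.max? ys (fun y => y) with
    | none =>
      rw [PySem.List.max?_eq_none_iff] at hy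
      subst hy
      have hx0 : xs = [] := h.symm.nil_eq.symm
      rw [hx0] at hx
      simp [PySem.List.max?] at hx
    | some w =>
      have hv := PySem.List.max?_mem hx
      have hw := PySem.List.max?_mem hy
      have h1 := PySem.List.max?_isMax hx _ (h.symm.mem_iff.mp hw)
      have h2 := PySem.List.max?_isMax hy _ (h.mem_iff.mp hv)
      simp only at h1 h2
      exact congrArg some (le_antisymm h2 h1)

-- max? of a descending list is its head
lemma max?_of_descending (v : Int) (t : List Int) (h : ∀ y ∈ t, y ≤ v) :
    PySem.List.max? (v :: t) (fun y => y) = some v := by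
  rw [PySem.List.max?_id_cons]
  rcases PySem.List.foldl_max_mem t v with h1 | h1
  · rw [h1]
  · rw [le_antisymm (h _ h1) (PySem.List.le_foldl_max t v).1]

-- pvFind [m] on a descending list bounded by m returns [m, first element < m]
lemma pvFind_descending (m : Int) (r : List Int) (hd : r.Pairwise (fun a b => b ≤ a))
    (hb : ∀ x ∈ r, x ≤ m) :
    pvFind [m] r = match r.filter (fun x => decide (x < m)) with
      | [] => none
      | v :: _ => some [m, v] := by
  induction r with
  | nil => simp [pvFind]
  | cons v t ih =>
    have hv := hb v List.mem_cons_self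
    by_cases hvm : v = m
    · subst hvm
      have : (v :: t).filter (fun x => decide (x < v)) = t.filter (fun x => decide (x < v)) := by
        simp
      rw [this]
      show (if [v].contains v then pvFind [v] t else _) = _
      rw [if_pos (by simp)]
      exact ih hd.of_cons (fun x hx => hb x (List.mem_cons_of_mem _ hx))
    · have hvlt : v < m := lt_of_le_of_ne hv hvm
      show (if [m].contains v then pvFind [m] t else some ([m] ++ [v])) = _
      rw [if_neg (by simp [hvm])]
      rw [List.filter_cons_of_pos (by simp [hvlt])]
      rfl

-- ===== VERDICT (by name: the statement is the Claim_ definition above) =====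
theorem firstSecond_spec : Claim_equal_firstSecond := by
  intro l _ hne
  have hsl : (PySem.List.sorted l (fun x => x) false).Perm l :=
    PySem.List.sorted_perm l (fun x => x) false
  have hsne : PySem.List.sorted l (fun x => x) false ≠ [] := by
    intro h0
    exact hne ((h0 ▸ hsl).nil_eq).symm
  have hpw : (PySem.List.sorted l (fun x => x) false).Pairwise (fun a b => a ≤ b) :=
    PySem.List.sorted_pairwise l (fun x => x)
  have hrpw : (PySem.List.sorted l (fun x => x) false).reverse.Pairwise (fun a b => b ≤ a) := by
    rw [List.pairwise_reverse]
    exact hpw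
  obtain ⟨m, t, hr⟩ : ∃ m t, (PySem.List.sorted l (fun x => x) false).reverse = m :: t := by
    cases h : (PySem.List.sorted l (fun x => x) false).reverse with
    | nil => exact absurd (List.reverse_eq_nil_iff.mp h) hsne
    | cons a b => exact ⟨a, b, rfl⟩
  have hbound : ∀ x ∈ (PySem.List.sorted l (fun x => x) false).reverse, x ≤ m := by
    intro x hx
    rw [hr] at hx
    rcases List.mem_cons.mp hx with h | h
    · exact le_of_eq h
    · exact (List.pairwise_cons.mp (hr ▸ hrpw)).1 x h
  have h1 : 1 ≤ (PySem.List.sorted l (fun x => x) false).length := List.length_pos_iff.mpr hsne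
  -- A's s[-1] is m, the maximum
  have hget : PySem.List.pyGet? (PySem.List.sorted l (fun x => x) false) (-1) = some m := by
    simp only [PySem.List.pyGet?, PySem.List.pyIdx?]
    rw [if_neg (by omega), if_pos (by omega)]
    simp only [Option.bind_some]
    rw [show (-(-1:Int)).toNat = 1 from rfl, ← List.getLast?_eq_getElem?, ← List.head?_reverse, hr]
    rfl
  -- B's max is also m
  have hmax : PySem.List.max? l (fun y => y) = some m := by
    rw [← max?_perm ((PySem.List.sorted l (fun x => x) false).reverse_perm.trans hsl), hr]
    exact max?_of_descending m t (fun y hy => hbound y (hr ▸ List.mem_cons_of_mem _ hy))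
  have hloop := pvLoopA_eq_pvFind (PySem.List.sorted l (fun x => x) false) [m]
    (PySem.List.sorted l (fun x => x) false).length le_rfl
  rw [List.take_length] at hloop
  have hperm : ((PySem.List.sorted l (fun x => x) false).reverse.filter
      (fun x => decide (x < m))).Perm (l.filter (fun x => decide (x < m))) :=
    ((PySem.List.sorted l (fun x => x) false).reverse_perm.trans hsl).filter _
  simp only [Spec_firstSecond, firstSecond, firstSecond_alt, hget, hmax, hloop,
    pvFind_descending m _ hrpw hbound]
  cases hf : (PySem.List.sorted l (fun x => x) false).reverse.filter
      (fun x => decide (x < m)) with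
  | nil =>
    have h0 : l.filter (fun x => decide (x < m)) = [] := ((hf ▸ hperm).nil_eq).symm
    rw [h0]
    simp [PySem.List.max?]
  | cons v tf =>
    have hfmax : PySem.List.max? (l.filter (fun x => decide (x < m))) (fun y => y) = some v := by
      rw [← max?_perm (hf ▸ hperm)]
      apply max?_of_descending
      have hh := hrpw.filter (fun x => decide (x < m))
      rw [hf] at hh
      exact fun y hy => (List.pairwise_cons.mp hh).1 y hy
    rw [hfmax]
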